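-- pv_equiv track=rewrite | github.com/SepehrQasemi/Buff | src/s2/failure.py | resolve_error_code
-- ===== SOURCE A (Python) =====
-- from typing import Any, Mapping, Sequence
--
-- ALLOWED_ERROR_CODES = frozenset(
--     {
--         "ARTIFACT_MISSING",
--         "DATA_INTEGRITY_FAILURE",
--         "DIGEST_MISMATCH",
--         "INPUT_DIGEST_MISMATCH",
--         "INPUT_INVALID",
--         "INPUT_MISSING",
--         "MISSING_CRITICAL_FUNDING_WINDOW",
--         "ORDERING_INVALID",
--         "SCHEMA_INVALID",
--         "SIMULATION_FAILED",
--     }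
-- )
--
-- ERROR_PRECEDENCE = (
--     "SCHEMA_INVALID",
--     "ARTIFACT_MISSING",
--     "DIGEST_MISMATCH",
--     "INPUT_DIGEST_MISMATCH",
--     "INPUT_MISSING",
--     "INPUT_INVALID",
--     "MISSING_CRITICAL_FUNDING_WINDOW",
--     "DATA_INTEGRITY_FAILURE",
--     "ORDERING_INVALID",
--     "SIMULATION_FAILED",
-- )
--
-- _ERROR_PRECEDENCE_RANK = {code: idx for idx, code in enumerate(ERROR_PRECEDENCE)}
--
-- def resolve_error_code(candidates: Sequence[str]) -> str:
--     valid_codes: list[str] = []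
--     for candidate in candidates:
--         code = str(candidate).strip().upper()
--         if code in ALLOWED_ERROR_CODES:
--             valid_codes.append(code)
--     if not valid_codes:
--         return "SIMULATION_FAILED"
--     return min(
--         valid_codes, key=lambda code: _ERROR_PRECEDENCE_RANK.get(code, len(ERROR_PRECEDENCE))
--     )
-- ===== SOURCE B (Python) =====
-- ALLOWED_ERROR_CODES = frozenset(
--     {
--         "ARTIFACT_MISSING",
--         "DATA_INTEGRITY_FAILURE",
--         "DIGEST_MISMATCH",
--         "INPUT_DIGEST_MISMATCH",
--         "INPUT_INVALID",
--         "INPUT_MISSING",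
--         "MISSING_CRITICAL_FUNDING_WINDOW",
--         "ORDERING_INVALID",
--         "SCHEMA_INVALID",
--         "SIMULATION_FAILED",
--     }
-- )
--
-- ERROR_PRECEDENCE = (
--     "SCHEMA_INVALID",
--     "ARTIFACT_MISSING",
--     "DIGEST_MISMATCH",
--     "INPUT_DIGEST_MISMATCH",
--     "INPUT_MISSING",
--     "INPUT_INVALID",
--     "MISSING_CRITICAL_FUNDING_WINDOW",
--     "DATA_INTEGRITY_FAILURE",
--     "ORDERING_INVALID",
--     "SIMULATION_FAILED",
-- )
--
--
-- def resolve_error_code(candidates):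
--     valid = set()
--     for candidate in candidates:
--         code = str(candidate).strip().upper()
--         if code in ALLOWED_ERROR_CODES:
--             valid.add(code)
--     for code in ERROR_PRECEDENCE:
--         if code in valid:
--             return code
--     return "SIMULATION_FAILED"
-- ===== Notes on version B (the rewrite author's own statement) =====
-- stated objective: idiomatic
-- what changed: Instead of collecting all valid codes into a list and taking min() keyed by a precedence-rank dict, B builds the set of valid normalized codes in one pass and then scans the fixed ERROR_PRECEDENCE tuple, returning the first code present in the set (fallback 'SIMULATION_FAILED').
import Mathlib
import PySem

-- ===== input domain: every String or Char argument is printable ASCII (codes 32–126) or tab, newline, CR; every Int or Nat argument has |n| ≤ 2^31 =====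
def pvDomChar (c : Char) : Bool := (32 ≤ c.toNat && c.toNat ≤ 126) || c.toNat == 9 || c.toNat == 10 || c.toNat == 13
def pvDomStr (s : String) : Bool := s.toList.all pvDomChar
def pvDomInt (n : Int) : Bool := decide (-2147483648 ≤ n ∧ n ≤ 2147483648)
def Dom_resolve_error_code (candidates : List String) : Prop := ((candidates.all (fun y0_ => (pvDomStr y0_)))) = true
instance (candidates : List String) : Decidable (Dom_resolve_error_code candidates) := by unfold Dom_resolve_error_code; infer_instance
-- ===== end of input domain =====

-- B replaces A's "collect valid codes then min-by-rank" with "build the set of valid codes,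
-- then return the first code of the fixed precedence tuple present in it" (objective: idiomatic).

-- ===== PORT A =====
-- module constant ALLOWED_ERROR_CODES (a frozenset, used only for membership)
def pvAllowedList : List String :=
  ["ARTIFACT_MISSING", "DATA_INTEGRITY_FAILURE", "DIGEST_MISMATCH", "INPUT_DIGEST_MISMATCH",
   "INPUT_INVALID", "INPUT_MISSING", "MISSING_CRITICAL_FUNDING_WINDOW", "ORDERING_INVALID",
   "SCHEMA_INVALID", "SIMULATION_FAILED"]
def pvAllowed : PySem.Set String := PySem.Set.ofList pvAllowedList
-- module constant ERROR_PRECEDENCE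
def pvPrecedence : List String :=
  ["SCHEMA_INVALID", "ARTIFACT_MISSING", "DIGEST_MISMATCH", "INPUT_DIGEST_MISMATCH",
   "INPUT_MISSING", "INPUT_INVALID", "MISSING_CRITICAL_FUNDING_WINDOW",
   "DATA_INTEGRITY_FAILURE", "ORDERING_INVALID", "SIMULATION_FAILED"]
-- module constant _ERROR_PRECEDENCE_RANK = {code: idx for idx, code in enumerate(ERROR_PRECEDENCE)}
def pvRankDict : PySem.Dict String Int :=
  (PySem.List.enumerate pvPrecedence 0).foldl (fun d p => d.insert p.2 p.1) PySem.Dict.empty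

def resolve_error_code (candidates : List String) : String :=
  let valid : List String := candidates.foldl
    (fun acc candidate =>
      let code := PySem.Str.upper (PySem.Str.strip candidate)
      if PySem.Set.contains pvAllowed code then acc ++ [code] else acc) []
  -- `if not valid_codes: return "SIMULATION_FAILED"` then `return min(valid_codes, key=…)`:
  -- min? is none exactly when the list is empty, so the two Python statements are this match
  match PySem.List.min? valid
      (fun code => PySem.Dict.getD pvRankDict code (pvPrecedence.length : Int)) with
  | none => "SIMULATION_FAILED"
  | some m => m

-- ===== PORT B =====
def resolve_error_code_alt (candidates : List String) : String :=
  let valid : PySem.Set String := candidates.foldl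
    (fun s candidate =>
      let code := PySem.Str.upper (PySem.Str.strip candidate)
      if PySem.Set.contains pvAllowed code then PySem.Set.add s code else s)
    PySem.Set.empty
  match pvPrecedence.find? (fun code => PySem.Set.contains valid code) with
  | some code => code
  | none => "SIMULATION_FAILED"

-- ===== PRECONDITION & SPEC =====
def Spec_resolve_error_code (candidates : List String) (out : String) : Prop := out = resolve_error_code_alt candidates
instance (candidates : List String) (out : String) : Decidable (Spec_resolve_error_code candidates out) := by unfold Spec_resolve_error_code; infer_instance

-- ===== CLAIM (what is proved, stated in full; the proofs are below) =====
def Claim_equal_resolve_error_code : Prop := ∀ (candidates : List String), Dom_resolve_error_code candidates → Spec_resolve_error_code candidates (resolve_error_code candidates)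

-- ===== LEMMAS AND PROOFS =====

-- the normalized codes of the candidates that pass the ALLOWED filter, in order
def pvFilt (cs : List String) : List String :=
  cs.filterMap (fun c =>
    if PySem.Set.contains pvAllowed (PySem.Str.upper (PySem.Str.strip c))
    then some (PySem.Str.upper (PySem.Str.strip c)) else none)

lemma pvA_fold (cs : List String) (acc : List String) :
    cs.foldl
      (fun acc candidate =>
        let code := PySem.Str.upper (PySem.Str.strip candidate)
        if PySem.Set.contains pvAllowed code then acc ++ [code] else acc) acc
      = acc ++ pvFilt cs := by
  induction cs generalizing acc with
  | nil => simp [pvFilt]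
  | cons c t ih =>
    simp only [List.foldl_cons, pvFilt, List.filterMap_cons]
    split
    · rw [ih]; simp_all [pvFilt]
    · rw [ih]; simp_all [pvFilt]

lemma pvB_fold (cs : List String) (s : PySem.Set String) :
    cs.foldl
      (fun s candidate =>
        let code := PySem.Str.upper (PySem.Str.strip candidate)
        if PySem.Set.contains pvAllowed code then PySem.Set.add s code else s) s
      = List.foldl PySem.Set.add s (pvFilt cs) := by
  induction cs generalizing s with
  | nil => simp [pvFilt]
  | cons c t ih =>
    simp only [List.foldl_cons, pvFilt, List.filterMap_cons]
    split
    · rw [ih]; simp_all [pvFilt]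
    · rw [ih]; simp_all [pvFilt]

-- a find? over a Nodup list returns the member of L with the smallest index
lemma pv_find_min (f : String → Bool) :
    ∀ (Q : List String), Q.Nodup → ∀ r, r ∈ Q → f r = true →
      (∀ q ∈ Q, f q = true → Q.idxOf r ≤ Q.idxOf q) → Q.find? f = some r := by
  intro Q
  induction Q with
  | nil => intro _ r hr; exact absurd hr (List.not_mem_nil)
  | cons p t ih =>
    intro hnd r hrQ hfr hmin
    by_cases hp : f p = true
    · have h0 := hmin p (List.mem_cons_self) hp
      rw [List.idxOf_cons_self] at h0
      have hrp : r = p := by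
        rcases List.mem_cons.mp hrQ with h | h
        · exact h
        · exfalso
          have hne : r ≠ p := by
            rintro rfl; exact (List.nodup_cons.mp hnd).1 h
          rw [List.idxOf_cons_ne _ (Ne.symm hne)] at h0; omega
      simp [hp, hrp]
    · have hne : r ≠ p := by rintro rfl; exact hp hfr
      have hrt : r ∈ t := by
        rcases List.mem_cons.mp hrQ with h | h
        · exact absurd h hne
        · exact h
      have hres := ih (List.nodup_cons.mp hnd).2 r hrt hfr ?_
      · simp [hp, hres]
      · intro q hq hfq
        have hqne : q ≠ p := by rintro rfl; exact hp hfq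
        have := hmin q (List.mem_cons_of_mem _ hq) hfq
        rw [List.idxOf_cons_ne _ (Ne.symm hne), List.idxOf_cons_ne _ (Ne.symm hqne)] at this
        omega

set_option maxHeartbeats 2000000 in
lemma pvFilt_allowed {cs : List String} {x : String} (hx : x ∈ pvFilt cs) :
    x ∈ pvAllowedList := by
  simp only [pvFilt, List.mem_filterMap] at hx
  obtain ⟨c, _, hc⟩ := hx
  split at hc
  · rename_i h
    cases hc
    exact (PySem.Set.mem_ofList _ _).mp ((PySem.Set.contains_iff _ _).mp h)
  · cases hc

set_option maxHeartbeats 2000000 in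
lemma pv_allowed_sub : ∀ x ∈ pvAllowedList, x ∈ pvPrecedence := by decide

set_option maxHeartbeats 2000000 in
lemma pv_precedence_nodup : pvPrecedence.Nodup := by decide

set_option maxHeartbeats 2000000 in
lemma pv_rank_eq_idxOf : ∀ x ∈ pvPrecedence,
    PySem.Dict.getD pvRankDict x (pvPrecedence.length : Int) = (pvPrecedence.idxOf x : Int) := by
  decide

set_option maxHeartbeats 2000000 in
theorem resolve_error_code_spec : Claim_equal_resolve_error_code := by
  intro cs _
  unfold Spec_resolve_error_code resolve_error_code resolve_error_code_alt
  rw [pvA_fold, pvB_fold, List.nil_append]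
  have hofl : List.foldl PySem.Set.add PySem.Set.empty (pvFilt cs)
      = PySem.Set.ofList (pvFilt cs) := (PySem.Set.ofList_eq_foldl _).symm
  rw [hofl]
  rcases hmin : PySem.List.min? (pvFilt cs)
      (fun code => PySem.Dict.getD pvRankDict code (pvPrecedence.length : Int)) with _ | m
  · -- pvFilt cs = [], so no precedence code is in the (empty) set
    have hnil : pvFilt cs = [] := (PySem.List.min?_eq_none_iff _ _).mp hmin
    have hfind : pvPrecedence.find?
        (fun code => PySem.Set.contains (PySem.Set.ofList (pvFilt cs)) code) = none := by
      rw [List.find?_eq_none]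
      intro x _ h
      exact absurd ((PySem.Set.mem_ofList _ _).mp ((PySem.Set.contains_iff _ _).mp h)) (by simp [hnil])
    simp only [hmin, hfind]
  · -- pvFilt cs ≠ []: the minimum-rank element is the first precedence code present
    have hm_mem : m ∈ pvFilt cs := PySem.List.min?_mem hmin
    have hm_min := PySem.List.min?_isMin hmin
    have hmP : m ∈ pvPrecedence := pv_allowed_sub m (pvFilt_allowed hm_mem)
    have hfind : pvPrecedence.find?
        (fun code => PySem.Set.contains (PySem.Set.ofList (pvFilt cs)) code) = some m := by
      apply pv_find_min _ _ pv_precedence_nodup m hmP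
      · exact (PySem.Set.contains_iff _ _).mpr ((PySem.Set.mem_ofList _ _).mpr hm_mem)
      · intro q hq hfq
        have hqL : q ∈ pvFilt cs := (PySem.Set.mem_ofList _ _).mp ((PySem.Set.contains_iff _ _).mp hfq)
        have := hm_min q hqL
        rw [pv_rank_eq_idxOf m hmP, pv_rank_eq_idxOf q hq] at this
        exact_mod_cast this
    simp only [hmin, hfind]
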